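-- pv_equiv track=rewrite | github.com/codebyfernanda/ADS_Mackenzie | ALGO-PROG-I/revisao.py | getSessionCount
-- ===== SOURCE A (Python) =====
-- def getSessionCount(timeout, userIds, timestamps):
--     # 1. Criar o dicionário para agrupar tempos por usuário
--     eventos_por_usuario = {}
--
--     # 2. Preencher o dicionário
--     for i in range(len(userIds)):
--         user = userIds[i]
--         time = timestamps[i]
--
--         if user not in eventos_por_usuario:
--             eventos_por_usuario[user] = []
--         eventos_por_usuario[user].append(time)
--
--     total_de_sessoes = 0
--
--     # 3. Contar as sessões para cada usuário
--     for user in eventos_por_usuario: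
--         # Ordena apenas os timestamps deste usuário específico
--         eventos = sorted(eventos_por_usuario[user])
--
--         sessoes = 1  # Se o usuário tem eventos, ele tem pelo menos 1 sessão
--
--         for i in range(1, len(eventos)):
--             # Se o intervalo entre eventos for maior que o timeout, nova sessão
--             if eventos[i] - eventos[i - 1] > timeout:
--                 sessoes += 1
--
--         total_de_sessoes += sessoes
--
--     return total_de_sessoes
-- ===== SOURCE B (Python) =====
-- def getSessionCount(timeout, userIds, timestamps):
--     events = sorted(zip(userIds, timestamps))
--     total = 0
--     prev = None
--     for u, t in events:
--         if prev is None or u != prev[0] or t - prev[1] > timeout: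
--             total += 1
--         prev = (u, t)
--     return total
-- ===== Notes on version B (the rewrite author's own statement) =====
-- stated objective: alternative
-- what changed: Replaces A's dict-of-lists grouping with nested per-user sorting loops by one global sort of the (user, timestamp) pairs followed by a single flat sweep that counts session boundaries (user change or gap > timeout).
import Mathlib
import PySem

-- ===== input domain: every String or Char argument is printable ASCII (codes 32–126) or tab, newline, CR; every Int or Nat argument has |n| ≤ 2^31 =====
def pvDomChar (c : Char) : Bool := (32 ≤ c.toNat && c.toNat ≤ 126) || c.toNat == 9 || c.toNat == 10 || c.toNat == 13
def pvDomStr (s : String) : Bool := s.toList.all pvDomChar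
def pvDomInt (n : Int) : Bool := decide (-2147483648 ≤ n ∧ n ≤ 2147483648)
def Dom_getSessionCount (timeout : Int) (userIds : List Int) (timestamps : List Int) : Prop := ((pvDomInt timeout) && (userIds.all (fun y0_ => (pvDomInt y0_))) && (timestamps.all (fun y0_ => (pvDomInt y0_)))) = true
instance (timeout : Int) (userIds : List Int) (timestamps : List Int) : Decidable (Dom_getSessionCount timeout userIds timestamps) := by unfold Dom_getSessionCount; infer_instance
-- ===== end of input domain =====

-- B replaces A's dict-of-lists grouping plus nested per-user loops by one global sort of the
-- (user, timestamp) pairs and a single boundary-counting sweep (objective: alternative decomposition).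

-- ===== PORT A =====
-- indices of both loops are always in range on Pre_, so pyGetD's default 0 is never read
def getSessionCount (timeout : Int) (userIds : List Int) (timestamps : List Int) : Int :=
  let eventos_por_usuario :=
    (PySem.List.pyRange 0 (PySem.List.len userIds)).foldl
      (fun d i =>
        let user := PySem.List.pyGetD userIds i 0
        let time := PySem.List.pyGetD timestamps i 0
        let d' := if d.contains user then d else d.insert user ([] : List Int)
        d'.modify user [] (fun l => l ++ [time]))
      PySem.Dict.empty
  eventos_por_usuario.keys.foldl
    (fun total user =>
      let eventos := PySem.List.sorted (eventos_por_usuario.getD user []) (fun x => x)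
      let sessoes :=
        (PySem.List.pyRange 1 (PySem.List.len eventos)).foldl
          (fun s i =>
            if PySem.List.pyGetD eventos i 0 - PySem.List.pyGetD eventos (i - 1) 0 > timeout
            then s + 1 else s)
          1
      total + sessoes)
    0

-- ===== PORT B =====
def pvSweepStep (timeout : Int) (st : Int × Option (Int × Int)) (p : Int × Int) :
    Int × Option (Int × Int) :=
  match st with
  | (total, none) => (total + 1, some p)
  | (total, some q) =>
      (if p.1 ≠ q.1 ∨ p.2 - q.2 > timeout then total + 1 else total, some p)

def getSessionCount_alt (timeout : Int) (userIds : List Int) (timestamps : List Int) : Int :=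
  let events := PySem.List.sorted2 (userIds.zip timestamps) Prod.fst Prod.snd
  (events.foldl (pvSweepStep timeout) (0, none)).1

-- ===== PRECONDITION & SPEC =====
-- Pre_ excludes inputs with fewer timestamps than userIds: A indexes timestamps[i] for every
-- i < len(userIds) and raises IndexError there.
def Pre_getSessionCount (timeout : Int) (userIds : List Int) (timestamps : List Int) : Prop :=
  userIds.length ≤ timestamps.length
instance (timeout : Int) (userIds : List Int) (timestamps : List Int) : Decidable (Pre_getSessionCount timeout userIds timestamps) := by unfold Pre_getSessionCount; infer_instance
def pvWitness_getSessionCount : Int × List Int × List Int := (5, [1, 1, 2], [0, 10, 3])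

def Spec_getSessionCount (timeout : Int) (userIds : List Int) (timestamps : List Int) (out : Int) : Prop := out = getSessionCount_alt timeout userIds timestamps
instance (timeout : Int) (userIds : List Int) (timestamps : List Int) (out : Int) : Decidable (Spec_getSessionCount timeout userIds timestamps out) := by unfold Spec_getSessionCount; infer_instance

-- ===== CLAIM (what is proved, stated in full; the proofs are below) =====
def Claim_equal_getSessionCount : Prop := ∀ (timeout : Int) (userIds : List Int) (timestamps : List Int), Dom_getSessionCount timeout userIds timestamps → Pre_getSessionCount timeout userIds timestamps → Spec_getSessionCount timeout userIds timestamps (getSessionCount timeout userIds timestamps)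

-- ===== LEMMAS AND PROOFS =====

-- number of gaps > timeout between consecutive elements of a (sorted) timestamp list
def pvGaps (timeout : Int) : List Int → Int
  | a :: b :: r => (if b - a > timeout then 1 else 0) + pvGaps timeout (b :: r)
  | _ => 0

-- the timestamps of user u among the zipped event pairs, in order
def pvTsOf (pairs : List (Int × Int)) (u : Int) : List Int :=
  (pairs.filter (fun p => p.1 == u)).map (fun p => p.2)

def pvEv (pairs : List (Int × Int)) (u : Int) : List Int :=
  PySem.List.sorted (pvTsOf pairs u) (fun x => x)

def pvSess (timeout : Int) (pairs : List (Int × Int)) (u : Int) : Int :=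
  1 + pvGaps timeout (pvEv pairs u)

def pvUsers (pairs : List (Int × Int)) : List Int :=
  PySem.Set.ofList (pairs.map Prod.fst)

def pvSUsers (pairs : List (Int × Int)) : List Int :=
  PySem.List.sorted (pvUsers pairs) (fun x => x)

def pvG (pairs : List (Int × Int)) : List (Int × Int) :=
  (pvSUsers pairs).flatMap (fun u => (pvEv pairs u).map (fun t => (u, t)))

-- ---- A side ----

lemma pv_index_pairs (u t : List Int) (h : u.length ≤ t.length) :
    (PySem.List.pyRange 0 (PySem.List.len u)).map
      (fun i => (PySem.List.pyGetD u i 0, PySem.List.pyGetD t i 0)) = u.zip t := by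
  apply List.ext_getElem
  · simp [PySem.List.length_pyRange_one, PySem.List.len]; omega
  · intro k h1 h2
    have hk : k < u.length := by
      simp [PySem.List.length_pyRange_one, PySem.List.len] at h1; omega
    have hk' : k < t.length := Nat.lt_of_lt_of_le hk h
    have hr : k < (PySem.List.pyRange 0 (PySem.List.len u)).length := by
      simp [PySem.List.length_pyRange_one, PySem.List.len]; omega
    simp only [List.getElem_map, PySem.List.getElem_pyRange_one _ _ _ hr, List.getElem_zip]
    rw [PySem.List.pyGetD_eq_getElem u 0 (by omega) (by push_cast; omega),
        PySem.List.pyGetD_eq_getElem t 0 (by omega) (by push_cast; omega)]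
    simp

lemma pv_stepA_eq (d : PySem.Dict Int (List Int)) (u t : Int) :
    (if d.contains u then d else d.insert u ([] : List Int)).modify u [] (fun l => l ++ [t])
      = d.modify u [] (fun l => l ++ [t]) := by
  by_cases h : d.contains u
  · simp [h]
  · simp only [h, Bool.false_eq_true, if_false]
    simp only [PySem.Dict.modify, PySem.Dict.getD_insert_self, PySem.Dict.insert_insert_self]
    rw [PySem.Dict.getD_of_not_contains d [] (by simpa using h)]

-- the consecutive index pairs of the inner loop are the consecutive element pairs
lemma pv_consec_pairs (l : List Int) :
    (PySem.List.pyRange 1 (PySem.List.len l)).map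
      (fun i => (PySem.List.pyGetD l (i - 1) 0, PySem.List.pyGetD l i 0)) = l.zip l.tail := by
  apply List.ext_getElem
  · simp [PySem.List.length_pyRange_one, PySem.List.len]
  · intro k h1 h2
    have hk : k + 1 < l.length := by
      simp [PySem.List.length_pyRange_one, PySem.List.len] at h1; omega
    have hr : k < (PySem.List.pyRange 1 (PySem.List.len l)).length := by
      simp [PySem.List.length_pyRange_one, PySem.List.len]; omega
    simp only [List.getElem_map, PySem.List.getElem_pyRange_one _ _ _ hr, List.getElem_zip]
    rw [show (1 : Int) + (k : Int) - 1 = (k : Int) by ring]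
    rw [PySem.List.pyGetD_eq_getElem l 0 (by omega) (by push_cast; omega),
        PySem.List.pyGetD_eq_getElem l 0 (by omega) (by push_cast; omega)]
    simp [List.getElem_tail]
    congr 1
    omega

lemma pv_zip_fold (timeout : Int) (l : List Int) (a : Int) :
    (l.zip l.tail).foldl (fun s p => if p.2 - p.1 > timeout then s + 1 else s) a
      = a + pvGaps timeout l := by
  induction l using pvGaps.induct generalizing a with
  | case1 x y r ih =>
      simp only [pvGaps, List.tail, List.zip_cons_cons, List.foldl]
      rw [show (y :: r).zip r = (y :: r).zip (y :: r).tail by simp, ih]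
      split_ifs <;> ring
  | case2 l h =>
      rcases l with _ | ⟨x, _ | ⟨y, r⟩⟩
      · simp [pvGaps]
      · simp [pvGaps]
      · exact absurd rfl (h x y r)

lemma pv_inner_fold (timeout : Int) (l : List Int) :
    (PySem.List.pyRange 1 (PySem.List.len l)).foldl
      (fun s i =>
        if PySem.List.pyGetD l i 0 - PySem.List.pyGetD l (i - 1) 0 > timeout then s + 1 else s)
      1 = 1 + pvGaps timeout l := by
  have h2 : (PySem.List.pyRange 1 (PySem.List.len l)).foldl
      (fun s i =>
        if PySem.List.pyGetD l i 0 - PySem.List.pyGetD l (i - 1) 0 > timeout then s + 1 else s)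
      1
    = (PySem.List.pyRange 1 (PySem.List.len l)).foldl
      (fun s i =>
        (fun (s : Int) (p : Int × Int) => if p.2 - p.1 > timeout then s + 1 else s) s
        ((fun i => (PySem.List.pyGetD l (i - 1) 0, PySem.List.pyGetD l i 0)) i)) 1 := rfl
  rw [h2, ← List.foldl_map (f := fun i => (PySem.List.pyGetD l (i - 1) 0, PySem.List.pyGetD l i 0))
    (g := fun (s : Int) (p : Int × Int) => if p.2 - p.1 > timeout then s + 1 else s),
    pv_consec_pairs l, pv_zip_fold]

lemma pv_dict_eq (u t : List Int) (h : u.length ≤ t.length) :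
    (PySem.List.pyRange 0 (PySem.List.len u)).foldl
      (fun d i =>
        let user := PySem.List.pyGetD u i 0
        let time := PySem.List.pyGetD t i 0
        let d' := if d.contains user then d else d.insert user ([] : List Int)
        d'.modify user [] (fun l => l ++ [time]))
      PySem.Dict.empty
    = (u.zip t).foldl (fun d p => d.modify p.1 [] (fun l => l ++ [p.2])) PySem.Dict.empty := by
  have h2 : (PySem.List.pyRange 0 (PySem.List.len u)).foldl
      (fun d i =>
        let user := PySem.List.pyGetD u i 0
        let time := PySem.List.pyGetD t i 0
        let d' := if d.contains user then d else d.insert user ([] : List Int)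
        d'.modify user [] (fun l => l ++ [time]))
      PySem.Dict.empty
    = (PySem.List.pyRange 0 (PySem.List.len u)).foldl
      (fun d i =>
        (fun (d : PySem.Dict Int (List Int)) (p : Int × Int) =>
          (if d.contains p.1 then d else d.insert p.1 ([] : List Int)).modify p.1 []
            (fun l => l ++ [p.2])) d
        ((fun i => (PySem.List.pyGetD u i 0, PySem.List.pyGetD t i 0)) i))
      PySem.Dict.empty := rfl
  rw [h2, ← List.foldl_map (f := fun i => (PySem.List.pyGetD u i 0, PySem.List.pyGetD t i 0))
    (g := fun (d : PySem.Dict Int (List Int)) (p : Int × Int) =>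
      (if d.contains p.1 then d else d.insert p.1 ([] : List Int)).modify p.1 []
        (fun l => l ++ [p.2])), pv_index_pairs u t h]
  exact PySem.List.foldl_congr_mem _ _ _ _ (fun d p _ => pv_stepA_eq d p.1 p.2)

lemma pv_A_eq_sum (timeout : Int) (userIds timestamps : List Int)
    (h : userIds.length ≤ timestamps.length) :
    getSessionCount timeout userIds timestamps
      = ((pvUsers (userIds.zip timestamps)).map
          (pvSess timeout (userIds.zip timestamps))).sum := by
  unfold getSessionCount
  rw [pv_dict_eq userIds timestamps h]
  set pairs := userIds.zip timestamps with hp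
  set D := pairs.foldl (fun d p => d.modify p.1 [] (fun l => l ++ [p.2])) PySem.Dict.empty with hD
  have hkeys : D.keys = pvUsers pairs := by
    rw [hD, PySem.Dict.keys_foldl_modify_key pairs Prod.fst [] (fun _ p l => l ++ [p.2])
      PySem.Dict.empty, PySem.Dict.keys_empty, PySem.Set.update_nil_left]
    rfl
  have hget : ∀ c, D.getD c [] = pvTsOf pairs c := by
    intro c
    rw [hD, PySem.Dict.getD_foldl_modify_append pairs PySem.Dict.empty c]
    simp [PySem.Dict.getD_empty, pvTsOf]
  have hout : D.keys.foldl
      (fun (total : Int) (user : Int) =>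
        let eventos := PySem.List.sorted (D.getD user []) (fun x => x)
        let sessoes :=
          (PySem.List.pyRange 1 (PySem.List.len eventos)).foldl
            (fun s i =>
              if PySem.List.pyGetD eventos i 0 - PySem.List.pyGetD eventos (i - 1) 0 > timeout
              then s + 1 else s) 1
        total + sessoes) 0
      = 0 + (D.keys.map (fun (user : Int) =>
          let eventos := PySem.List.sorted (D.getD user []) (fun x => x)
          (PySem.List.pyRange 1 (PySem.List.len eventos)).foldl
            (fun s i =>
              if PySem.List.pyGetD eventos i 0 - PySem.List.pyGetD eventos (i - 1) 0 > timeout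
              then s + 1 else s) 1)).sum :=
    PySem.List.foldl_add D.keys _ 0
  refine hout.trans ?_
  rw [zero_add, hkeys]
  refine congrArg List.sum (List.map_congr_left ?_)
  intro u _
  show (PySem.List.pyRange 1 (PySem.List.len (PySem.List.sorted (D.getD u []) (fun x => x)))).foldl
      (fun s i =>
        if PySem.List.pyGetD (PySem.List.sorted (D.getD u []) (fun x => x)) i 0
          - PySem.List.pyGetD (PySem.List.sorted (D.getD u []) (fun x => x)) (i - 1) 0 > timeout
        then s + 1 else s) 1 = pvSess timeout pairs u
  rw [hget u]
  exact pv_inner_fold timeout (pvEv pairs u)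

-- ---- B side ----

lemma pv_sorted2_eq_sorted_lex (xs : List (Int × Int)) :
    PySem.List.sorted2 xs Prod.fst Prod.snd
      = PySem.List.sorted xs (fun p => toLex p) := by
  have hb : (fun (a b : Int × Int) => decide (a.1 < b.1) || (!decide (b.1 < a.1) && decide (a.2 < b.2)))
          = (fun (a b : Int × Int) => decide (toLex a < toLex b)) := by
    funext a b
    by_cases h1 : a.1 < b.1 <;> by_cases h2 : b.1 < a.1 <;> by_cases h3 : a.2 < b.2 <;>
      simp [Prod.Lex.lt_iff, h1, h2, h3] <;> omega
  show xs.foldl (fun acc x => PySem.List.insertBy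
      (fun a b => decide (a.1 < b.1) || (!decide (b.1 < a.1) && decide (a.2 < b.2))) x acc) []
    = xs.foldl (fun acc x => PySem.List.insertBy (fun a b => decide (toLex a < toLex b)) x acc) []
  rw [hb]

-- group u as present inside pvG equals the filtered pairs, up to permutation
lemma pv_group_perm (pairs : List (Int × Int)) (u : Int) :
    ((pvEv pairs u).map (fun t => (u, t))).Perm (pairs.filter (fun p => p.1 == u)) := by
  refine ((PySem.List.sorted_perm (pvTsOf pairs u) (fun x => x) false).map _).trans ?_
  unfold pvTsOf
  rw [List.map_map]
  have : ∀ p ∈ pairs.filter (fun p => p.1 == u), ((fun t => (u, t)) ∘ fun p => p.2) p = id p := by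
    intro p hp
    have := List.of_mem_filter hp
    simp at this
    simp only [Function.comp_apply, id_eq]
    rw [← this]
  rw [List.map_congr_left this, List.map_id]

lemma pv_count_flat (pairs : List (Int × Int)) (us : List Int) (hnd : us.Nodup) (x : Int × Int) :
    (us.flatMap (fun u => pairs.filter (fun p => p.1 == u))).count x
      = if x.1 ∈ us then pairs.count x else 0 := by
  induction us with
  | nil => simp
  | cons u us' ih =>
      rw [List.flatMap_cons, List.count_append]
      rcases List.nodup_cons.mp hnd with ⟨hu, hnd'⟩
      by_cases hx : x.1 = u
      · have h1 : (pairs.filter (fun p => p.1 == u)).count x = pairs.count x :=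
          List.count_filter (by simp [hx])
        have h2 : x.1 ∉ us' := hx ▸ hu
        rw [h1, ih hnd', if_neg h2, if_pos (by simp [hx])]
        ring
      · have h1 : (pairs.filter (fun p => p.1 == u)).count x = 0 := by
          rw [List.count_eq_zero]
          intro hmem
          exact hx (by simpa using (List.of_mem_filter hmem))
        rw [h1, ih hnd', zero_add]
        by_cases h3 : x.1 ∈ us' <;> simp [h3, List.mem_cons, hx]

lemma pv_susers_nodup (pairs : List (Int × Int)) : (pvSUsers pairs).Nodup :=
  ((PySem.List.sorted_perm _ _ _).nodup_iff).mpr (PySem.Set.nodup_ofList _)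

lemma pv_G_perm (pairs : List (Int × Int)) : (pvG pairs).Perm pairs := by
  unfold pvG
  refine (List.Perm.flatMap_left _ (fun u _ => pv_group_perm pairs u)).trans ?_
  rw [List.perm_iff_count]
  intro x
  rw [pv_count_flat pairs _ (pv_susers_nodup pairs) x]
  by_cases hx : x.1 ∈ pvSUsers pairs
  · rw [if_pos hx]
  · rw [if_neg hx, eq_comm, List.count_eq_zero]
    intro hmem
    exact hx (by
      unfold pvSUsers
      rw [PySem.List.mem_sorted]
      exact (PySem.Set.mem_ofList _ _).mpr (List.mem_map_of_mem hmem))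

lemma pv_susers_sorted (pairs : List (Int × Int)) :
    (pvSUsers pairs).Pairwise (· < ·) := by
  have h1 := PySem.List.sorted_pairwise (pvUsers pairs) (fun x => x)
  have h2 := pv_susers_nodup pairs
  exact (List.Pairwise.and h1 h2).imp (fun {a b} hab => lt_of_le_of_ne hab.1 hab.2)

lemma pv_flat_pairwise (pairs : List (Int × Int)) (us : List Int)
    (h : us.Pairwise (· < ·)) :
    (us.flatMap (fun u => (pvEv pairs u).map (fun t => (u, t)))).Pairwise
      (fun a b => toLex a ≤ toLex b) := by
  induction us with
  | nil => simp
  | cons u us' ih =>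
      rw [List.flatMap_cons, List.pairwise_append]
      rcases List.pairwise_cons.mp h with ⟨hu, hus'⟩
      refine ⟨?_, ih hus', ?_⟩
      · -- inside one group: same fst, snd sorted
        have hs := PySem.List.sorted_pairwise (pvTsOf pairs u) (fun x => x)
        exact hs.map _ (fun {a b} hab => by simp [Prod.Lex.le_iff]; omega)
      · intro a ha b hb
        rcases List.mem_map.mp ha with ⟨t1, _, rfl⟩
        rcases List.mem_flatMap.mp hb with ⟨v, hv, hbv⟩
        rcases List.mem_map.mp hbv with ⟨t2, _, rfl⟩
        have : u < v := hu v hv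
        simp [Prod.Lex.le_iff]
        omega

lemma pv_G_pairwise (pairs : List (Int × Int)) :
    (pvG pairs).Pairwise (fun a b => toLex a ≤ toLex b) :=
  pv_flat_pairwise pairs _ (pv_susers_sorted pairs)

lemma pv_sorted_eq_G (pairs : List (Int × Int)) :
    PySem.List.sorted pairs (fun p => toLex p) = pvG pairs := by
  refine PySem.List.eq_of_perm_of_pairwise_le_of_injective (fun p => toLex p)
    (fun a b hab => by simpa using hab)
    ((PySem.List.sorted_perm _ _ _).trans (pv_G_perm pairs).symm)
    (PySem.List.sorted_pairwise _ _) (pv_G_pairwise pairs)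

lemma pv_sweep_same (timeout : Int) (u t0 tot : Int) (ts : List Int) :
    (ts.map (fun t => (u, t))).foldl (pvSweepStep timeout) (tot, some (u, t0))
      = (tot + pvGaps timeout (t0 :: ts), some (u, (t0 :: ts).getLast (by simp))) := by
  induction ts generalizing t0 tot with
  | nil => simp [pvGaps]
  | cons a r ih =>
      rw [List.map_cons, List.foldl_cons]
      have hstep : pvSweepStep timeout (tot, some (u, t0)) (u, a)
          = (tot + (if a - t0 > timeout then 1 else 0), some (u, a)) := by
        simp [pvSweepStep]
        split_ifs <;> simp_all <;> omega
      rw [hstep, ih]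
      rw [Prod.mk.injEq]
      refine ⟨by simp only [pvGaps]; ring, ?_⟩
      simp [List.getLast_cons]

lemma pv_sweep_group (timeout : Int) (u tot : Int) (prev : Option (Int × Int))
    (hprev : ∀ q, prev = some q → q.1 ≠ u) (ts : List Int) (hne : ts ≠ []) :
    (ts.map (fun t => (u, t))).foldl (pvSweepStep timeout) (tot, prev)
      = (tot + 1 + pvGaps timeout ts, some (u, ts.getLast hne)) := by
  rcases ts with _ | ⟨a, r⟩
  · exact absurd rfl hne
  · rw [List.map_cons, List.foldl_cons]
    have hstep : pvSweepStep timeout (tot, prev) (u, a) = (tot + 1, some (u, a)) := by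
      rcases prev with _ | q
      · simp [pvSweepStep]
      · have := hprev q rfl
        simp [pvSweepStep, this.symm]
    rw [hstep, pv_sweep_same]

lemma pv_sweep_flat (timeout : Int) (pairs : List (Int × Int)) (us : List Int)
    (hnd : us.Nodup) (hmem : ∀ u ∈ us, pvEv pairs u ≠ [])
    (tot : Int) (prev : Option (Int × Int)) (hprev : ∀ q, prev = some q → q.1 ∉ us) :
    ((us.flatMap (fun u => (pvEv pairs u).map (fun t => (u, t)))).foldl
        (pvSweepStep timeout) (tot, prev)).1
      = tot + (us.map (pvSess timeout pairs)).sum := by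
  induction us generalizing tot prev with
  | nil => simp
  | cons u us' ih =>
      rw [List.flatMap_cons, List.foldl_append]
      rcases List.nodup_cons.mp hnd with ⟨hu, hnd'⟩
      have hneu : pvEv pairs u ≠ [] := hmem u List.mem_cons_self
      rw [pv_sweep_group timeout u tot prev
        (fun q hq => by intro he; exact (hprev q hq) (he ▸ List.mem_cons_self))
        (pvEv pairs u) hneu]
      have hih := ih hnd' (fun v hv => hmem v (List.mem_cons_of_mem _ hv))
        (tot + 1 + pvGaps timeout (pvEv pairs u))
        (some (u, (pvEv pairs u).getLast hneu))
        (fun q hq => by cases Option.some.inj hq; simpa using hu)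
      rw [hih]
      simp [pvSess]
      ring

lemma pv_B_eq_sum (timeout : Int) (userIds timestamps : List Int) :
    getSessionCount_alt timeout userIds timestamps
      = ((pvSUsers (userIds.zip timestamps)).map
          (pvSess timeout (userIds.zip timestamps))).sum := by
  unfold getSessionCount_alt
  rw [pv_sorted2_eq_sorted_lex, pv_sorted_eq_G]
  unfold pvG
  rw [pv_sweep_flat timeout (userIds.zip timestamps) _ (pv_susers_nodup _)
    (fun u hu => by
      unfold pvEv
      rw [Ne, PySem.List.sorted_eq_nil_iff]
      have hu' : u ∈ (userIds.zip timestamps).map Prod.fst := by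
        have := (PySem.List.mem_sorted _ _ _ u).mp hu
        exact (PySem.Set.mem_ofList _ _).mp this
      rcases List.mem_map.mp hu' with ⟨p, hp, rfl⟩
      unfold pvTsOf
      simp only [ne_eq, List.map_eq_nil_iff, List.filter_eq_nil_iff]
      intro hall
      exact (by simpa using hall p hp)
    ) 0 none (fun q hq => by cases hq)]
  rw [zero_add]

-- ===== VERDICT (by name: the statement is the Claim_ definition above) =====
theorem getSessionCount_spec : Claim_equal_getSessionCount := by
  intro timeout userIds timestamps _ hpre
  unfold Spec_getSessionCount
  rw [pv_A_eq_sum timeout userIds timestamps hpre, pv_B_eq_sum]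
  exact (List.Perm.sum_eq (List.Perm.map _ (PySem.List.sorted_perm _ _ _))).symm
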